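-- pv_equiv track=rewrite | github.com/deesatzed/Genesis_Prime | apps/option1_mono_agent/adaptive_immune_memory.py | _detect_operation_loops
-- ===== SOURCE A (Python) =====
-- from typing import Dict, List, Optional, Any, Set, Tuple
--
-- def _detect_operation_loops(history: List) -> bool:
--     """Detect loops in operation history"""
--     if len(history) < 10:
--         return False
--
--     # Check for repeated patterns in recent history
--     recent = history[-10:]
--     for i in range(len(recent) - 2):
--         for j in range(i + 2, len(recent)):
--             if recent[i] == recent[j]:
--                 # Found potential loop
--                 pattern_length = j - i
--                 if pattern_length < 5:  # Short patterns are suspicious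
--                     return True
--
--     return False
-- ===== SOURCE B (Python) =====
-- def _detect_operation_loops(history):
--     """Detect loops in operation history: any element repeated at gap 2, 3 or 4
--     within the last 10 operations."""
--     if len(history) < 10:
--         return False
--     recent = history[-10:]
--     for d in (2, 3, 4):
--         for i in range(len(recent) - d):
--             if recent[i] == recent[i + d]:
--                 return True
--     return False
-- ===== Notes on version B (the rewrite author's own statement) =====
-- stated objective: simpler
-- what changed: Replaces enumeration of all index pairs (i,j) filtered by j-i<5 with a direct scan over the three relevant gap distances d in (2,3,4), comparing recent[i] with recent[i+d]; the distance filter and the pattern_length variable disappear.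
import Mathlib
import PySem

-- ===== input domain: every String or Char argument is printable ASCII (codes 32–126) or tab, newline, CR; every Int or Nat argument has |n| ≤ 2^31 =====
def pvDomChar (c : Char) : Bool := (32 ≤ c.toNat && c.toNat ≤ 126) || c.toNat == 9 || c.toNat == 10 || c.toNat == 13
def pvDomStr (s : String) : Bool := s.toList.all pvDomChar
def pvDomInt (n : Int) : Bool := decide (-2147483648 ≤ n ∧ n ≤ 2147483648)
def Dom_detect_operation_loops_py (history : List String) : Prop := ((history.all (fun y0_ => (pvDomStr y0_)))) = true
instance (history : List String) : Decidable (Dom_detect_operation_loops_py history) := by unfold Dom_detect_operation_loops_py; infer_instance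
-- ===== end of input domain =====

-- B replaces pair enumeration filtered by distance with a direct scan over the gaps 2,3,4: simpler, same result.
-- ===== PORT A =====
-- recent[i]/recent[j] indices are always in range (0 <= i < j < len), so List.getD is exact here.
def detect_operation_loops_py (history : List String) : Bool :=
  if history.length < 10 then false
  else
    let recent := PySem.List.slice history (some (-10)) none
    (List.range (recent.length - 2)).any fun i =>
      (List.range' (i + 2) (recent.length - (i + 2))).any fun j =>
        (recent.getD i "" == recent.getD j "") && decide (j - i < 5)

-- ===== PORT B =====
def detect_operation_loops_py_alt (history : List String) : Bool :=
  if history.length < 10 then false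
  else
    let recent := PySem.List.slice history (some (-10)) none
    [2, 3, 4].any fun d =>
      (List.range (recent.length - d)).any fun i =>
        recent.getD i "" == recent.getD (i + d) ""

-- ===== PRECONDITION & SPEC =====
def Spec_detect_operation_loops_py (history : List String) (out : Bool) : Prop := out = detect_operation_loops_py_alt history
instance (history : List String) (out : Bool) : Decidable (Spec_detect_operation_loops_py history out) := by unfold Spec_detect_operation_loops_py; infer_instance

-- ===== CLAIM (what is proved, stated in full; the proofs are below) =====
def Claim_equal_detect_operation_loops_py : Prop := ∀ (history : List String), Dom_detect_operation_loops_py history → Spec_detect_operation_loops_py history (detect_operation_loops_py history)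

-- ===== LEMMAS AND PROOFS =====

-- The two index enumerations describe the same set of comparisons: a pair (i, j)
-- with i + 2 ≤ j < L and j - i < 5 corresponds exactly to a gap d = j - i ∈ {2,3,4}
-- with i < L - d.
theorem detect_loops_any_eq (r : List String) :
    ((List.range (r.length - 2)).any fun i =>
      (List.range' (i + 2) (r.length - (i + 2))).any fun j =>
        (r.getD i "" == r.getD j "") && decide (j - i < 5))
    = ([2, 3, 4].any fun d =>
      (List.range (r.length - d)).any fun i =>
        r.getD i "" == r.getD (i + d) "") := by
  rw [Bool.eq_iff_iff]
  simp only [List.any_eq_true, List.mem_range, List.mem_range', Bool.and_eq_true,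
    decide_eq_true_eq, beq_iff_eq, List.mem_cons, List.not_mem_nil, or_false]
  constructor
  · rintro ⟨i, hi, j, ⟨hj1, hj2⟩, heq, hlt⟩
    refine ⟨j - i, by omega, i, by omega, ?_⟩
    rwa [show i + (j - i) = j by omega]
  · rintro ⟨d, (rfl | rfl | rfl), i, hi, heq⟩
    · exact ⟨i, by omega, i + 2, ⟨0, by omega, by omega⟩, heq, by omega⟩
    · exact ⟨i, by omega, i + 3, ⟨1, by omega, by omega⟩, heq, by omega⟩
    · exact ⟨i, by omega, i + 4, ⟨2, by omega, by omega⟩, heq, by omega⟩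

-- ===== VERDICT (by name: the statement is the Claim_ definition above) =====
theorem detect_operation_loops_py_spec : Claim_equal_detect_operation_loops_py := by
  intro history _
  unfold Spec_detect_operation_loops_py detect_operation_loops_py detect_operation_loops_py_alt
  by_cases h : history.length < 10
  · simp [h]
  · simp only [h, if_false]
    exact detect_loops_any_eq _
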